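-- pv_equiv track=rewrite | github.com/ivanromanv/manuales | Python/Edx_Course/Introduction to Programming Using Python/Excercises/W5_Function_lista_numeros_impares_desc.py | funcion_lista_numeros_impares_desc
-- ===== SOURCE A (Python) =====
-- def funcion_lista_numeros_impares_desc(number_one, number_two):
--    my_index=int(0)
--    contador=int(0)
--    lista_impares=[]
--    for numero in range(number_one,number_two+1):
--       if numero%2 != 0:
--          contador=contador+2
--          lista_impares.append(numero)
--          my_index = lista_impares.index(numero)
--    lista_impares.reverse()
--    return lista_impares
-- ===== SOURCE B (Python) =====
-- def funcion_lista_numeros_impares_desc(number_one, number_two):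
--     start = number_two if number_two % 2 != 0 else number_two - 1
--     return list(range(start, number_one - 1, -2))
-- ===== Notes on version B (the rewrite author's own statement) =====
-- stated objective: simpler
-- what changed: Replaces the element-by-element loop with parity test, append, redundant .index scan and final reverse by a single closed-form descending range(start, number_one-1, -2) starting at the largest odd <= number_two.
import Mathlib
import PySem

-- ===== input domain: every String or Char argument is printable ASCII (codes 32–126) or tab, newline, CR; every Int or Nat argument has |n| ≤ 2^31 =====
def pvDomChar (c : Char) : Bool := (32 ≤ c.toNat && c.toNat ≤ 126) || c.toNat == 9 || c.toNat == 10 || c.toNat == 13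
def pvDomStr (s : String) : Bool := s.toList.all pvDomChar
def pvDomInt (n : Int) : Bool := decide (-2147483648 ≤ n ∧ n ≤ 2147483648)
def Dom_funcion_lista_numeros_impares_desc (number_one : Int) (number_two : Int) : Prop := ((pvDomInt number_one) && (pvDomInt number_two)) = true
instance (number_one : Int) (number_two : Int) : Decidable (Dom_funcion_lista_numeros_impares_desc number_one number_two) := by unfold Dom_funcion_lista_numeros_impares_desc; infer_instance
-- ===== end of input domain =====

-- B replaces A's element loop (parity test + append + redundant .index rescan + final reverse)
-- by one closed-form descending range expression (simpler).

-- ===== PORT A =====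
-- state = (my_index, contador, lista_impares), exactly A's loop variables
def funcion_lista_numeros_impares_desc (number_one : Int) (number_two : Int) : List Int :=
  let st := (PySem.List.pyRange number_one (number_two + 1) 1).foldl
    (fun (s : Int × Int × List Int) numero =>
      if PySem.Int.mod numero 2 ≠ 0 then
        let contador := s.2.1 + 2
        let lista := s.2.2 ++ [numero]
        -- lista_impares.index(numero): numero was just appended, so the lookup succeeds;
        -- getD 0 is never reached (exact on every admitted input)
        let my_index : Int := ((PySem.List.index? lista numero).getD 0 : Nat)
        (my_index, contador, lista)
      else s)
    ((0 : Int), (0 : Int), ([] : List Int))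
  st.2.2.reverse

-- ===== PORT B =====
def funcion_lista_numeros_impares_desc_alt (number_one : Int) (number_two : Int) : List Int :=
  let start := if PySem.Int.mod number_two 2 ≠ 0 then number_two else number_two - 1
  PySem.List.pyRange start (number_one - 1) (-2)

-- ===== PRECONDITION & SPEC =====
def Spec_funcion_lista_numeros_impares_desc (number_one : Int) (number_two : Int) (out : List Int) : Prop := out = funcion_lista_numeros_impares_desc_alt number_one number_two
instance (number_one : Int) (number_two : Int) (out : List Int) : Decidable (Spec_funcion_lista_numeros_impares_desc number_one number_two out) := by unfold Spec_funcion_lista_numeros_impares_desc; infer_instance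

-- ===== CLAIM (what is proved, stated in full; the proofs are below) =====
def Claim_equal_funcion_lista_numeros_impares_desc : Prop := ∀ (number_one : Int) (number_two : Int), Dom_funcion_lista_numeros_impares_desc number_one number_two → Spec_funcion_lista_numeros_impares_desc number_one number_two (funcion_lista_numeros_impares_desc number_one number_two)

-- ===== LEMMAS AND PROOFS =====

-- the list component of A's loop state ignores my_index and contador
theorem pvA_third (l : List Int) (s : Int × Int × List Int) :
    (l.foldl
      (fun (s : Int × Int × List Int) numero =>
        if PySem.Int.mod numero 2 ≠ 0 then
          let contador := s.2.1 + 2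
          let lista := s.2.2 ++ [numero]
          let my_index : Int := ((PySem.List.index? lista numero).getD 0 : Nat)
          (my_index, contador, lista)
        else s) s).2.2
    = l.foldl (fun acc numero => if PySem.Int.mod numero 2 ≠ 0 then acc ++ [numero] else acc) s.2.2 := by
  induction l generalizing s with
  | nil => rfl
  | cons x xs ih =>
      simp only [List.foldl_cons]
      rw [ih]
      congr 1
      have hm : PySem.Int.mod x 2 = x % 2 := PySem.Int.mod_eq_emod_of_pos (by norm_num)
      rcases Int.emod_two_eq x with h | h
      · simp [hm, h]
      · simp [h]

-- cons-unfolding of a step −2 countdown range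
theorem pvRange_neg_two_cons (a b : Int) (h : b < a) :
    PySem.List.pyRange a b (-2) = a :: PySem.List.pyRange (a - 2) b (-2) := by
  simp only [PySem.List.pyRange]
  norm_num
  have h1 : ¬((-2 : Int) = 0) := by norm_num
  have hcount : ((a - b + 2 - 1) / 2).toNat =
      (if b < a - 2 then ((a - 2 - b + 2 - 1) / 2).toNat else 0) + 1 := by
    split_ifs with h2 <;> omega
  rw [if_pos h, hcount, List.range_succ_eq_map]
  simp [List.map_map, Function.comp]
  intro k _
  ring

theorem pvRange_neg_two_nil (a b : Int) (h : a ≤ b) :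
    PySem.List.pyRange a b (-2) = [] := by
  simp only [PySem.List.pyRange]
  norm_num
  intro h2
  omega

-- core equivalence: reversed odd-filter of the ascending range is the descending step −2 range
theorem pvKey (k : Nat) : ∀ (n1 n2 : Int), (n2 + 1 - n1).toNat = k →
    ((PySem.List.pyRange n1 (n2 + 1) 1).filter (fun n => decide (PySem.Int.mod n 2 ≠ 0))).reverse
      = PySem.List.pyRange (if PySem.Int.mod n2 2 ≠ 0 then n2 else n2 - 1) (n1 - 1) (-2) := by
  induction k with
  | zero =>
      intro n1 n2 hk
      have hle : n2 + 1 ≤ n1 := by omega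
      rw [PySem.List.pyRange_one_eq_nil hle]
      have h2 : PySem.Int.mod n2 2 = n2 % 2 := PySem.Int.mod_eq_emod_of_pos (by norm_num)
      rw [pvRange_neg_two_nil]
      · rfl
      · split_ifs <;> omega
  | succ k ih =>
      intro n1 n2 hk
      have hle : n1 ≤ n2 := by omega
      have h2 : PySem.Int.mod n2 2 = n2 % 2 := PySem.Int.mod_eq_emod_of_pos (by norm_num)
      have h2' : PySem.Int.mod (n2 - 1) 2 = (n2 - 1) % 2 := PySem.Int.mod_eq_emod_of_pos (by norm_num)
      have hsplit : PySem.List.pyRange n1 (n2 + 1) 1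
          = PySem.List.pyRange n1 ((n2 - 1) + 1) 1 ++ [n2] := by
        rw [show n2 - 1 + 1 = n2 by ring]
        exact PySem.List.pyRange_one_succ_right hle
      rw [hsplit, List.filter_append, List.reverse_append]
      rw [ih n1 (n2 - 1) (by omega)]
      by_cases hodd : PySem.Int.mod n2 2 ≠ 0
      · have ho : n2 % 2 = 1 := by have h := hodd; rw [h2] at h; omega
        have hfil : List.filter (fun n => decide (PySem.Int.mod n 2 ≠ 0)) [n2] = [n2] := by
          simp [ho]
        have hodd' : ¬ PySem.Int.mod (n2 - 1) 2 ≠ 0 := by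
          rw [h2']; omega
        rw [hfil, if_pos hodd, if_neg hodd']
        rw [pvRange_neg_two_cons n2 (n1 - 1) (by omega)]
        rw [show n2 - 1 - 1 = n2 - 2 by ring]
        simp
      · have he : n2 % 2 = 0 := by have h := not_not.mp hodd; rw [h2] at h; exact h
        have hfil : List.filter (fun n => decide (PySem.Int.mod n 2 ≠ 0)) [n2] = [] := by
          simp
          omega
        have hodd' : PySem.Int.mod (n2 - 1) 2 ≠ 0 := by
          rw [h2']; omega
        rw [hfil, if_neg hodd, if_pos hodd']
        simp

-- ===== VERDICT (by name: the statement is the Claim_ definition above) =====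
theorem funcion_lista_numeros_impares_desc_spec : Claim_equal_funcion_lista_numeros_impares_desc := by
  intro n1 n2 _
  show _ = _
  unfold funcion_lista_numeros_impares_desc funcion_lista_numeros_impares_desc_alt
  simp only [pvA_third]
  rw [PySem.List.foldl_append_ite_eq_filter]
  have := pvKey ((n2 + 1 - n1).toNat) n1 n2 rfl
  simpa using this
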